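-- pv_equiv track=rewrite | github.com/glangetasq/FundClustering_Fall2020 | Tools/get_features.py | get_positive_length
-- ===== SOURCE A (Python) =====
-- def get_positive_length(ts):
--     """
--     Give the maximum number of days that a timeserie was positive.
--
--     Input:
--         ts: timeserie, array-like
--     Output:
--         m: max positive length of the timeserie.
--     """
--     ranges = []
--     n = len(ts)
--     length = 0
--     for i in range(n):
--         if ts[i] > 0:
--             length += 1
--         else:
--             if length != 0:
--                 ranges.append(length)
--             length = 0
--     if length > 0:
--         ranges.append(length)
--     return 0 if len(ranges) == 0 else max(ranges)
-- ===== SOURCE B (Python) =====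
-- def get_positive_length(ts):
--     """Max run length of consecutive positive values, by scanning run-by-run
--     (span decomposition) instead of maintaining a counter with a flush."""
--     best = 0
--     i, n = 0, len(ts)
--     while i < n:
--         if ts[i] <= 0:
--             i += 1
--         else:
--             j = i
--             while j < n and ts[j] > 0:
--                 j += 1
--             if j - i > best:
--                 best = j - i
--             i = j
--     return best
-- ===== Notes on version B (the rewrite author's own statement) =====
-- stated objective: alternative
-- what changed: Replaces A's single scan that accumulates run lengths into a list and takes max(ranges) at the end by a two-pointer span decomposition: skip nonpositives, measure each maximal positive run in an inner scan, and keep only the running best (no ranges list, no post-loop flush).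
import Mathlib
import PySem

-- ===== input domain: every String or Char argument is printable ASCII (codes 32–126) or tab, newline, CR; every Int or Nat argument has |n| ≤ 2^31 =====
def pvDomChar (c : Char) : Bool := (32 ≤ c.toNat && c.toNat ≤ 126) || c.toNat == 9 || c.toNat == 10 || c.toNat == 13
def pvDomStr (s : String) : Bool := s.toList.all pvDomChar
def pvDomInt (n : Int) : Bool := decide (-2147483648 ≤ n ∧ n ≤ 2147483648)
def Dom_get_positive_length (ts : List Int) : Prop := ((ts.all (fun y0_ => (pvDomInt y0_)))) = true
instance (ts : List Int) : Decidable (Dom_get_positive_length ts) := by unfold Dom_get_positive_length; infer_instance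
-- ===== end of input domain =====

-- B replaces A's counter-with-flush scan (list of run lengths, then max) by a
-- two-pointer span decomposition keeping only the running best; alternative, not faster.

-- ===== PORT A =====
def get_positive_length (ts : List Int) : Int :=
  -- ranges = []; length = 0; for i in range(n): …
  let st := (PySem.List.pyRange 0 (ts.length : Int) 1).foldl
    (fun (st : List Int × Int) i =>
      if 0 < PySem.List.pyGetD ts i 0 then (st.1, st.2 + 1)
      else (if st.2 ≠ 0 then st.1 ++ [st.2] else st.1, 0))
    ([], 0)
  -- if length > 0: ranges.append(length)
  let ranges := if 0 < st.2 then st.1 ++ [st.2] else st.1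
  -- return 0 if len(ranges) == 0 else max(ranges)
  if ranges.length = 0 then 0 else (PySem.List.max? ranges (fun y => y)).getD 0

-- ===== PORT B =====
-- inner while: measure the maximal positive run at the front, jump past it
def pvAltGo : List Int → Int → Int
  | [], best => best
  | x :: rest, best =>
    if x ≤ 0 then pvAltGo rest best
    else
      let run := (x :: rest).takeWhile (fun y => decide (0 < y))
      pvAltGo ((x :: rest).dropWhile (fun y => decide (0 < y)))
        (if (run.length : Int) > best then (run.length : Int) else best)
termination_by ts _ => ts.length
decreasing_by
  · simp
  · simp only [List.dropWhile]
    have hx : decide (0 < x) = true := by simp; omega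
    rw [hx]
    simp only [List.length_cons]
    exact Nat.lt_succ_of_le (List.length_dropWhile_le _ _)

def get_positive_length_alt (ts : List Int) : Int := pvAltGo ts 0

-- ===== PRECONDITION & SPEC =====
def Spec_get_positive_length (ts : List Int) (out : Int) : Prop := out = get_positive_length_alt ts
instance (ts : List Int) (out : Int) : Decidable (Spec_get_positive_length ts out) := by unfold Spec_get_positive_length; infer_instance

-- ===== CLAIM (what is proved, stated in full; the proofs are below) =====
def Claim_equal_get_positive_length : Prop := ∀ (ts : List Int), Dom_get_positive_length ts → Spec_get_positive_length ts (get_positive_length ts)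

-- ===== LEMMAS AND PROOFS =====

-- reference scan: max run length given current run length l
def pvCont : List Int → Int → Int
  | [], l => l
  | x :: t, l => if 0 < x then pvCont t (l + 1) else max l (pvCont t 0)

theorem pvCont_nonneg : ∀ (ts : List Int) (l : Int), 0 ≤ l → 0 ≤ pvCont ts l := by
  intro ts
  induction ts with
  | nil => intro l h; simpa [pvCont] using h
  | cons x t ih =>
    intro l h
    simp only [pvCont]
    split_ifs
    · exact ih _ (by omega)
    · exact le_max_of_le_left h

theorem pvCont_span : ∀ (ts : List Int) (l : Int), 0 ≤ l →
    pvCont ts l = max (l + ((ts.takeWhile (fun y => decide (0 < y))).length : Int))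
      (pvCont (ts.dropWhile (fun y => decide (0 < y))) 0) := by
  intro ts
  induction ts with
  | nil =>
    intro l h
    simp [pvCont]
    omega
  | cons x t ih =>
    intro l h
    by_cases hx : 0 < x
    · have hxd : decide (0 < x) = true := by simpa using hx
      simp only [pvCont, List.takeWhile, List.dropWhile, hxd, if_pos hx]
      rw [ih (l + 1) (by omega)]
      simp only [List.length_cons]
      congr 1
      push_cast
      ring
    · have hxd : decide (0 < x) = false := by simpa using hx
      simp only [pvCont, List.takeWhile, List.dropWhile, hxd, if_neg hx]
      have ht : 0 ≤ pvCont t 0 := pvCont_nonneg t 0 le_rfl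
      simp
      omega

theorem pvAltGo_eq : ∀ (ts : List Int) (best : Int), 0 ≤ best →
    pvAltGo ts best = max best (pvCont ts 0) := by
  suffices h : ∀ (n : Nat) (ts : List Int), ts.length ≤ n → ∀ (best : Int), 0 ≤ best →
      pvAltGo ts best = max best (pvCont ts 0) by
    exact fun ts best hb => h ts.length ts le_rfl best hb
  intro n
  induction n with
  | zero =>
    intro ts hts best hb
    have : ts = [] := List.eq_nil_of_length_eq_zero (Nat.le_zero.mp hts)
    subst this
    simp only [pvAltGo, pvCont]
    omega
  | succ n ih =>
    intro ts hts best hb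
    cases ts with
    | nil =>
      simp only [pvAltGo, pvCont]
      omega
    | cons x rest =>
      by_cases hx : x ≤ 0
      · simp only [pvAltGo, if_pos hx, pvCont]
        rw [ih rest (by simpa using Nat.lt_succ_iff.mp (Nat.lt_of_lt_of_le (Nat.lt_succ_self _) (by simpa using hts))) best hb]
        rw [if_neg (by omega)]
        have := pvCont_nonneg rest 0 le_rfl
        omega
      · simp only [pvAltGo, if_neg hx]
        have hxd : decide (0 < x) = true := by simp; omega
        have hdrop : (x :: rest).dropWhile (fun y => decide (0 < y)) = rest.dropWhile (fun y => decide (0 < y)) := by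
          simp only [List.dropWhile, hxd]
        have hlen : ((x :: rest).dropWhile (fun y => decide (0 < y))).length ≤ n := by
          rw [hdrop]
          exact Nat.le_trans (List.length_dropWhile_le _ _) (Nat.lt_succ_iff.mp (by simpa using hts))
        have hrun : (0:Int) ≤ (((x :: rest).takeWhile (fun y => decide (0 < y))).length : Int) := by positivity
        rw [ih _ hlen _ (by split_ifs <;> omega)]
        rw [pvCont_span (x :: rest) 0 le_rfl]
        have := pvCont_nonneg ((x :: rest).dropWhile (fun y => decide (0 < y))) 0 le_rfl
        split_ifs <;> omega

-- A side: list max with seed 0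
def pvLmax (r : List Int) : Int := r.foldl max 0

theorem pvLmax_nonneg (r : List Int) : 0 ≤ pvLmax r :=
  (PySem.List.le_foldl_max r 0).1

theorem pvLmax_append (r : List Int) (l : Int) : pvLmax (r ++ [l]) = max (pvLmax r) l := by
  simp [pvLmax]

-- python max(r) on a nonempty list of nonnegatives = fold of max with seed 0
theorem pvMax?_eq_lmax (r : List Int) (hne : r ≠ []) (hpos : ∀ a ∈ r, 0 ≤ a) :
    (PySem.List.max? r (fun y => y)).getD 0 = pvLmax r := by
  cases r with
  | nil => exact absurd rfl hne
  | cons a t =>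
    rw [PySem.List.max?_id_cons]
    simp only [Option.getD_some, pvLmax, List.foldl_cons]
    have ha : 0 ≤ a := hpos a (by simp)
    have : max 0 a = a := by omega
    rw [this]

def pvStep (st : List Int × Int) (x : Int) : List Int × Int :=
  if 0 < x then (st.1, st.2 + 1)
  else (if st.2 ≠ 0 then st.1 ++ [st.2] else st.1, 0)

def pvFinish (st : List Int × Int) : Int :=
  let ranges := if 0 < st.2 then st.1 ++ [st.2] else st.1
  if ranges.length = 0 then 0 else (PySem.List.max? ranges (fun y => y)).getD 0

theorem pvFinish_eq (r : List Int) (l : Int) (hl : 0 ≤ l) (hr : ∀ a ∈ r, 1 ≤ a) :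
    pvFinish (r, l) = max (pvLmax r) l := by
  unfold pvFinish
  simp only
  split_ifs with h1 h2 h2
  · simp at h2
  · rw [pvMax?_eq_lmax _ (by simp) ?_]
    · rw [pvLmax_append]
    · intro a ha
      rcases List.mem_append.mp ha with h | h
      · have := hr a h; omega
      · simp at h; omega
  · -- l = 0 and ranges = r = []
    have hre : r = [] := List.eq_nil_of_length_eq_zero h2
    subst hre
    simp [pvLmax]
    omega
  · rw [pvMax?_eq_lmax _ (fun he => h2 (by simp [he])) (fun a ha => by have := hr a ha; omega)]
    have := pvLmax_nonneg r
    omega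

theorem pvFold_eq : ∀ (ts : List Int) (r : List Int) (l : Int), 0 ≤ l → (∀ a ∈ r, 1 ≤ a) →
    pvFinish (ts.foldl pvStep (r, l)) = max (pvLmax r) (pvCont ts l) := by
  intro ts
  induction ts with
  | nil =>
    intro r l hl hr
    simp only [List.foldl_nil, pvCont]
    exact pvFinish_eq r l hl hr
  | cons x t ih =>
    intro r l hl hr
    simp only [List.foldl_cons, pvStep, pvCont]
    by_cases hx : 0 < x
    · rw [if_pos hx, if_pos hx]
      exact ih r (l + 1) (by omega) hr
    · rw [if_neg hx, if_neg hx]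
      by_cases hl0 : l ≠ 0
      · rw [if_pos hl0]
        rw [ih (r ++ [l]) 0 le_rfl ?_]
        · rw [pvLmax_append]
          omega
        · intro a ha
          rcases List.mem_append.mp ha with h | h
          · exact hr a h
          · simp at h; omega
      · rw [if_neg hl0]
        have hl00 : l = 0 := by omega
        subst hl00
        rw [ih r 0 le_rfl hr]
        have := pvCont_nonneg t 0 le_rfl
        omega

-- ===== VERDICT (by name: the statement is the Claim_ definition above) =====
theorem get_positive_length_spec : Claim_equal_get_positive_length := by
  intro ts _
  unfold Spec_get_positive_length get_positive_length get_positive_length_alt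
  have hA : (PySem.List.pyRange 0 (ts.length : Int) 1).foldl
      (fun (st : List Int × Int) i =>
        if 0 < PySem.List.pyGetD ts i 0 then (st.1, st.2 + 1)
        else (if st.2 ≠ 0 then st.1 ++ [st.2] else st.1, 0))
      ([], 0) = ts.foldl pvStep ([], 0) := by
    rw [show (fun (st : List Int × Int) i =>
        if 0 < PySem.List.pyGetD ts i 0 then (st.1, st.2 + 1)
        else (if st.2 ≠ 0 then st.1 ++ [st.2] else st.1, 0)) =
        (fun (st : List Int × Int) i => pvStep st (PySem.List.pyGetD ts i 0)) from rfl]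
    rw [PySem.List.foldl_pyRange_pyGetD' ts 0 pvStep ([], 0) le_rfl]
    simp
  simp only [hA]
  have := pvFold_eq ts [] 0 le_rfl (by simp)
  have hfin : pvFinish (ts.foldl pvStep ([], 0)) =
      (let st := ts.foldl pvStep ([], 0)
       let ranges := if 0 < st.2 then st.1 ++ [st.2] else st.1
       if ranges.length = 0 then 0 else (PySem.List.max? ranges (fun y => y)).getD 0) := rfl
  rw [pvAltGo_eq ts 0 le_rfl]
  rw [← hfin, this]
  simp [pvLmax]
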